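-- pv_equiv track=rewrite | github.com/lucasmrdt/ia-project | AI/utils/lists.py | sublists
-- ===== SOURCE A (Python) =====
-- def sublists(l, size):
--     def get_at_idx(idx):
--         return l[idx % len(l)]
--
--     for i in range(len(l)):
--         ll = []
--         for j in range(size):
--             ll.append(get_at_idx(i + j))
--         yield ll
-- ===== SOURCE B (Python) =====
-- def sublists(l, size):
--     # B: precompute one repeated list long enough, then bulk-slice it per index.
--     if not l:
--         return
--     n = max(size, 0)
--     ext = l * (n // len(l) + 2)
--     for i in range(len(l)):
--         yield ext[i:i + n]
-- ===== Notes on version B (the rewrite author's own statement) =====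
-- stated objective: faster
-- what changed: Replaces the per-element modular-indexing inner loop by one precomputed repeated list ext = l * reps and a single bulk slice ext[i:i+n] per index.
import Mathlib
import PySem

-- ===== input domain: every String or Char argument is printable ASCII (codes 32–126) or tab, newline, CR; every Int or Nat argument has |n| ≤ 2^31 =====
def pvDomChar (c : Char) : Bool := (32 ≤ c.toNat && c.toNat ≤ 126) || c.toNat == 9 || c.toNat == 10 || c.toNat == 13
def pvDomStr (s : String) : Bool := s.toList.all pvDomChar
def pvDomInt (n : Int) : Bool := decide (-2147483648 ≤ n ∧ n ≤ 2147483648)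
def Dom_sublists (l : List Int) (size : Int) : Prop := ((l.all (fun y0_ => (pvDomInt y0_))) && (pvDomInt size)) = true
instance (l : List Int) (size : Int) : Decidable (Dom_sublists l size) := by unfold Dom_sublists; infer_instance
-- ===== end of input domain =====

-- B builds one repeated list and bulk-slices it per index instead of A's per-element modular indexing (measured faster by a constant factor).
-- Both generators are ported as the list of yielded values.

-- ===== PORT A =====
-- get_at_idx: l[idx % len(l)]; the index idx % len(l) is always in [0, len l) here (the loop
-- runs only when l is nonempty), so the default 0 of pyGetD is never used.
def sublists (l : List Int) (size : Int) : List (List Int) :=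
  (PySem.List.pyRange 0 l.length 1).map (fun i =>
    (PySem.List.pyRange 0 size 1).foldl
      (fun ll j => ll ++ [PySem.List.pyGetD l (PySem.Int.mod (i + j) l.length) 0]) [])

-- ===== PORT B =====
def sublists_alt (l : List Int) (size : Int) : List (List Int) :=
  if l = [] then []
  else
    let n := max size 0
    let ext := PySem.List.pyRepeat l (PySem.Int.floordiv n l.length + 2)
    (PySem.List.pyRange 0 l.length 1).map (fun i => PySem.List.slice ext (some i) (some (i + n)))

-- ===== PRECONDITION & SPEC =====
def Spec_sublists (l : List Int) (size : Int) (out : List (List Int)) : Prop := out = sublists_alt l size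
instance (l : List Int) (size : Int) (out : List (List Int)) : Decidable (Spec_sublists l size out) := by unfold Spec_sublists; infer_instance

-- ===== CLAIM (what is proved, stated in full; the proofs are below) =====
def Claim_equal_sublists : Prop := ∀ (l : List Int) (size : Int), Dom_sublists l size → Spec_sublists l size (sublists l size)

-- ===== LEMMAS AND PROOFS =====

lemma pyRange_zero_toNat (size : Int) :
    PySem.List.pyRange 0 size 1 = (List.range size.toNat).map (fun k : Nat => (k : Int)) := by
  by_cases h : 0 ≤ size
  · rw [show size = ((size.toNat : Nat) : Int) from (Int.toNat_of_nonneg h).symm,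
      PySem.List.pyRange_zero_natCast, Int.toNat_natCast]
  · have h0 : size.toNat = 0 := by omega
    rw [h0]
    simp [PySem.List.pyRange, show ¬ ((0:Int) < size) by omega]

lemma flat_rep_length {α : Type} (l : List α) (r : Nat) :
    ((List.replicate r l).flatten).length = r * l.length := by
  induction r with
  | zero => simp
  | succ r ih => simp [List.replicate_succ, ih, Nat.succ_mul]; omega

lemma flat_rep_getElem? (l : List Int) :
    ∀ (r k : Nat), k < r * l.length →
      ((List.replicate r l).flatten)[k]? = l[k % l.length]? := by
  intro r
  induction r with
  | zero => intro k h; omega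
  | succ r ih =>
    intro k h
    rw [List.replicate_succ, List.flatten_cons]
    by_cases hk : k < l.length
    · rw [List.getElem?_append_left hk, Nat.mod_eq_of_lt hk]
    · have hk' : l.length ≤ k := by omega
      have h' : k - l.length < r * l.length := by
        have hx : (r + 1) * l.length = r * l.length + l.length := by ring
        omega
      rw [List.getElem?_append_right hk', ih (k - l.length) h']
      congr 1
      conv_rhs => rw [show k = l.length + (k - l.length) by omega]
      rw [Nat.add_mod_left]

-- the per-index inner lists agree
lemma inner_eq (l : List Int) (size : Int) (hl : l ≠ []) (i : Nat) (hi : i < l.length) :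
    (PySem.List.pyRange 0 size 1).foldl
      (fun ll j => ll ++ [PySem.List.pyGetD l (PySem.Int.mod ((i : Int) + j) l.length) 0]) []
    = PySem.List.slice (PySem.List.pyRepeat l (PySem.Int.floordiv (max size 0) l.length + 2))
        (some (i : Int)) (some ((i : Int) + max size 0)) := by
  have hlen : 0 < l.length := List.length_pos_of_ne_nil hl
  have hmax : max size 0 = ((size.toNat : Nat) : Int) := by omega
  have hdiv : PySem.Int.floordiv ((size.toNat : Nat) : Int) (l.length : Int) + 2
      = (((size.toNat / l.length + 2 : Nat)) : Int) := by
    rw [PySem.Int.floordiv_natCast]; push_cast; ring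
  have hext : PySem.List.pyRepeat l (((size.toNat / l.length + 2 : Nat)) : Int)
      = (List.replicate (size.toNat / l.length + 2) l).flatten := by
    simp only [PySem.List.pyRepeat, Int.toNat_natCast]
  rw [hmax, hdiv, hext, PySem.List.foldl_append_singleton_eq_map, List.nil_append,
    pyRange_zero_toNat, List.map_map]
  have hslice : PySem.List.slice ((List.replicate (size.toNat / l.length + 2) l).flatten)
      (some (i : Int)) (some ((i : Int) + ((size.toNat : Nat) : Int)))
      = List.take size.toNat
          (List.drop i ((List.replicate (size.toNat / l.length + 2) l).flatten)) := by
    rw [show ((i : Int) + ((size.toNat : Nat) : Int)) = (((i + size.toNat : Nat)) : Int) by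
        push_cast; ring,
      PySem.List.slice_natCast]
    congr 1
    omega
  rw [hslice]
  have hextlen := flat_rep_length l (size.toNat / l.length + 2)
  have hbig : i + size.toNat
      ≤ ((List.replicate (size.toNat / l.length + 2) l).flatten).length := by
    rw [hextlen]
    have h1 := Nat.div_add_mod size.toNat l.length
    have h2 := Nat.mod_lt size.toNat hlen
    nlinarith
  have hL : ∀ k ∈ List.range size.toNat,
      ((fun j => PySem.List.pyGetD l (PySem.Int.mod ((i : Int) + j) (l.length : Int)) 0)
        ∘ (fun k : Nat => (k : Int))) k = l.getD ((i + k) % l.length) 0 := by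
    intro k _
    simp only [Function.comp_apply]
    rw [show ((i : Int) + (k : Int)) = (((i + k : Nat)) : Int) by push_cast; ring,
      PySem.Int.mod_natCast, PySem.List.pyGetD_natCast]
  rw [List.map_congr_left hL]
  apply List.ext_getElem
  · simp only [List.length_map, List.length_range, List.length_take, List.length_drop]
    omega
  · intro j hj1 hj2
    have hjn : j < size.toNat := by simpa using hj1
    have hij : i + j < ((List.replicate (size.toNat / l.length + 2) l).flatten).length := by
      omega
    have hq := flat_rep_getElem? l (size.toNat / l.length + 2) (i + j) (by omega)
    rw [List.getElem?_eq_getElem hij,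
      List.getElem?_eq_getElem (Nat.mod_lt _ hlen)] at hq
    simp only [List.getElem_map, List.getElem_range, List.getElem_take, List.getElem_drop]
    rw [Option.some_inj.mp hq]
    exact List.getD_eq_getElem l 0 (Nat.mod_lt _ hlen)

-- ===== VERDICT (by name: the statement is the Claim_ definition above) =====
theorem sublists_spec : Claim_equal_sublists := by
  intro l size _
  unfold Spec_sublists sublists sublists_alt
  by_cases hl : l = []
  · subst hl; simp [PySem.List.pyRange]
  · rw [if_neg hl]
    dsimp only
    rw [pyRange_zero_toNat ((l.length : Nat) : Int)]
    simp only [Int.toNat_natCast, List.map_map]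
    apply List.map_congr_left
    intro i hi
    simp only [Function.comp_apply]
    exact inner_eq l size hl i (List.mem_range.mp hi)
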